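-- pv_equiv track=rewrite | github.com/m-adamek/prg-basics | 04-Functions/section 7/7-26.py | f
-- ===== SOURCE A (Python) =====
-- def f(dice):
--     # Initialize variables
--     dice = str(dice)
--     current_streak = 1
--     highest_streak = 1
--     number_with_highest_streak = dice[0]  # Start with the first digit as default
--
--     # Loop through the string starting from the second character
--     for i in range(1, len(dice)):
--         if dice[i] == dice[i - 1]:
--             # Increase current streak if current digit matches the previous one
--             current_streak += 1
--         else:
--             # Reset current streak if the sequence breaks
--             current_streak = 1
--
--         # Update highest streak if the current streak is longer
--         if current_streak > highest_streak:
--             highest_streak = current_streak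
--             number_with_highest_streak = dice[i]
--
--     return int(number_with_highest_streak)
-- ===== SOURCE B (Python) =====
-- def f(dice):
--     # Run-length encode str(dice), then take the first longest run (max keeps
--     # the first maximal element, matching A's strict '>' update tie-break).
--     s = str(dice)
--     runs = []
--     rest = s
--     while rest:
--         c = rest[0]
--         k = 1
--         while k < len(rest) and rest[k] == c:
--             k += 1
--         runs.append((c, k))
--         rest = rest[k:]
--     c, _ = max(runs, key=lambda r: r[1])
--     return int(c)
-- ===== Notes on version B (the rewrite author's own statement) =====
-- stated objective: alternative
-- what changed: B first run-length encodes str(dice) into (char, length) runs and then takes the first longest run with max, instead of A's single streak-tracking loop with three mutable state variables.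
import Mathlib
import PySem

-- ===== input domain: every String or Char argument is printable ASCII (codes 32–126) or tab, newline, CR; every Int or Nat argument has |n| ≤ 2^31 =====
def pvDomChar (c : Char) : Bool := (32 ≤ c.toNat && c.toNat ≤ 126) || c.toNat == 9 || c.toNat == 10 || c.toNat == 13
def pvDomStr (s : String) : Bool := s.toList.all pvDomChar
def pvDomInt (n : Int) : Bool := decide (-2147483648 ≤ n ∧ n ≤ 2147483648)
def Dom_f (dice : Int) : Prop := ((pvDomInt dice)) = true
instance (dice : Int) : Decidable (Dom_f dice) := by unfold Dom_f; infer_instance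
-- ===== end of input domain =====

-- B replaces A's three-variable streak-tracking loop by run-length encoding str(dice)
-- and taking the first longest run with max (same cost; objective: alternative).


-- ===== PORT A =====
-- the loop body of A (reads the fixed string s by index, exactly as the Python loop does)
def pvBodyA (s : List Char) (st : Int × Int × Char) (i : Int) : Int × Int × Char :=
  let cur : Int :=
    if PySem.List.pyGetD s i ' ' = PySem.List.pyGetD s (i - 1) ' ' then st.1 + 1 else 1
  if cur > st.2.1 then (cur, cur, PySem.List.pyGetD s i ' ') else (cur, st.2.1, st.2.2)

def f (dice : Int) : Int :=
  let s : List Char := PySem.Int.toChars dice           -- dice = str(dice)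
  -- (current_streak, highest_streak, number_with_highest_streak); dice[0] is in range (str(n) is nonempty)
  let st := (PySem.List.pyRange 1 (s.length : Int)).foldl (pvBodyA s)
              (1, 1, PySem.List.pyGetD s 0 ' ')
  -- int(ch); ValueError (none) occurs only on inputs excluded by Pre_f
  (PySem.Int.ofChars? [st.2.2]).getD 0

-- ===== PORT B =====
-- run-length encoding: B's outer while loop over the remaining string (the inner while
-- scanning one run is the takeWhile, the slice rest[k:] is the dropWhile)
def pvRuns (l : List Char) : List (Char × Nat) :=
  match l with
  | [] => []
  | c :: rest =>
    (c, (rest.takeWhile (fun d => d == c)).length + 1) ::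
      pvRuns (rest.dropWhile (fun d => d == c))
termination_by l.length
decreasing_by
  simpa using Nat.lt_succ_of_le (List.length_dropWhile_le _ rest)

def f_alt (dice : Int) : Int :=
  let s : List Char := PySem.Int.toChars dice
  let runs := pvRuns s
  -- max(runs, key=lambda r: r[1]); runs is never empty since str(dice) is nonempty
  let best := PySem.List.maxD runs (fun r => r.2) (' ', 0)
  (PySem.Int.ofChars? [best.1]).getD 0

-- ===== PRECONDITION & SPEC =====
def pvHasAdj : List Char → Bool
  | a :: b :: t => a == b || pvHasAdj (b :: t)
  | _ => false

-- Pre_f excludes exactly the inputs on which A raises ValueError: negative dice whose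
-- decimal string has no two equal adjacent characters, where A (and B) attempt int('-').
def Pre_f (dice : Int) : Prop :=
  0 ≤ dice ∨ pvHasAdj (PySem.Int.toChars dice) = true
instance (dice : Int) : Decidable (Pre_f dice) := by unfold Pre_f; infer_instance

def pvWitness_f : Int := 211

def Spec_f (dice : Int) (out : Int) : Prop := out = f_alt dice
instance (dice : Int) (out : Int) : Decidable (Spec_f dice out) := by unfold Spec_f; infer_instance

-- ===== CLAIM (what is proved, stated in full; the proofs are below) =====
def Claim_equal_f : Prop := ∀ (dice : Int), Dom_f dice → Pre_f dice → Spec_f dice (f dice)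

-- ===== LEMMAS AND PROOFS =====

-- A's loop, re-expressed structurally: prev is the previous character, t the rest of
-- the string, the state is (current_streak, highest_streak, best char).
def pvLoopA : Char → List Char → Int × Int × Char → Int × Int × Char
  | _, [], st => st
  | prev, c :: t, st =>
    let cur : Int := if c = prev then st.1 + 1 else 1
    pvLoopA c t (if cur > st.2.1 then (cur, cur, c) else (cur, st.2.1, st.2.2))

-- B's max over runs, carried as (highest length so far : Int, its char).
def pvMaxFold : Int × Char → List (Char × Nat) → Int × Char
  | acc, [] => acc
  | (hi, best), (c, k) :: rs => pvMaxFold (if hi < (k : Int) then ((k : Int), c) else (hi, best)) rs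

-- Bridge: A's index fold over range(1, len(s)) is pvLoopA over the tail of s.
lemma pvBridge : ∀ (t pre : List Char) (st : Int × Int × Char), pre ≠ [] →
    (PySem.List.pyRange (pre.length : Int) (((pre ++ t).length : Int))).foldl (pvBodyA (pre ++ t)) st
      = pvLoopA (pre.getLastD ' ') t st := by
  intro t
  induction t with
  | nil =>
    intro pre st _
    rw [PySem.List.pyRange_one_eq_nil (by simp)]
    simp [pvLoopA]
  | cons c t ih =>
    intro pre st hpre
    have h0 : 0 < pre.length := List.length_pos_iff.mpr hpre
    have hlt : (pre.length : Int) < ((pre ++ c :: t).length : Int) := by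
      simp only [List.length_append, List.length_cons]; omega
    rw [PySem.List.pyRange_one_cons hlt]
    have hgi : PySem.List.pyGetD (pre ++ c :: t) (pre.length : Int) ' ' = c := by
      rw [PySem.List.pyGetD_eq_getElem _ _ (by omega)
        (by simp only [List.length_append, List.length_cons]; omega)]
      simp only [Int.toNat_natCast]
      exact List.getElem_of_append rfl rfl
    have hgp : PySem.List.pyGetD (pre ++ c :: t) ((pre.length : Int) - 1) ' ' = pre.getLastD ' ' := by
      have hcast : ((pre.length : Int) - 1) = ((pre.length - 1 : Nat) : Int) := by omega
      rw [hcast, PySem.List.pyGetD_eq_getElem _ _ (by omega)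
        (by simp only [List.length_append, List.length_cons]; push_cast; omega)]
      simp only [Int.toNat_natCast]
      rw [List.getElem_append_left (by omega)]
      rw [List.getLastD_eq_getLast?, List.getLast?_eq_getElem?,
        List.getElem?_eq_getElem (by omega)]
      rfl
    have step : pvBodyA (pre ++ c :: t) st (pre.length : Int)
        = (let cur : Int := if c = pre.getLastD ' ' then st.1 + 1 else 1
           if cur > st.2.1 then (cur, cur, c) else (cur, st.2.1, st.2.2)) := by
      simp only [pvBodyA, hgi, hgp]
    have happ : pre ++ c :: t = (pre ++ [c]) ++ t := by simp
    have ih' := ih (pre ++ [c]) (pvBodyA (pre ++ c :: t) st (pre.length : Int)) (by simp)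
    rw [happ] at ih'
    rw [show ((pre ++ [c]).length : Int) = (pre.length : Int) + 1 by
      simp only [List.length_append, List.length_cons, List.length_nil]; omega] at ih'
    rw [happ]
    simp only [List.foldl_cons]
    rw [ih']
    rw [← happ]
    rw [step]
    simp [pvLoopA]

-- Absorbing one run: j more copies of prev advance the streak by j and update
-- (highest, best) exactly once, by whether the run's end beats the old highest.
lemma pvAbsorb : ∀ (j : Nat) (prev : Char) (rest : List Char) (cur hi : Int) (best : Char),
    cur ≤ hi →
    pvLoopA prev (List.replicate j prev ++ rest) (cur, hi, best)
      = pvLoopA prev rest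
          (cur + j, if hi < cur + j then (cur + j, prev) else (hi, best)) := by
  intro j
  induction j with
  | zero =>
    intro prev rest cur hi best h
    simp only [List.replicate_zero, List.nil_append, Nat.cast_zero, add_zero]
    rw [if_neg (by omega)]
  | succ j ih =>
    intro prev rest cur hi best h
    rw [List.replicate_succ, List.cons_append]
    simp only [pvLoopA, if_true]
    by_cases hcase : cur + 1 > hi
    · rw [if_pos hcase, ih prev rest (cur + 1) (cur + 1) prev (le_refl _)]
      rw [if_pos (show hi < cur + ((j + 1 : Nat) : Int) by push_cast; omega)]
      congr 1
      by_cases h3 : cur + 1 < cur + 1 + (j : Int)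
      · rw [if_pos h3]
        simp only [Prod.mk.injEq]
        refine ⟨by push_cast; ring, by push_cast; ring, trivial⟩
      · rw [if_neg h3]
        simp only [Prod.mk.injEq]
        refine ⟨by omega, by omega, trivial⟩
    · rw [if_neg hcase, ih prev rest (cur + 1) hi best (by omega)]
      congr 1
      by_cases h3 : hi < cur + 1 + (j : Int)
      · rw [if_pos h3, if_pos (by push_cast; omega)]
        simp only [Prod.mk.injEq]
        refine ⟨by push_cast; ring, by push_cast; ring, trivial⟩
      · rw [if_neg h3, if_neg (by push_cast at h3 ⊢; omega)]
        simp only [Prod.mk.injEq]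
        exact ⟨by push_cast; ring, trivial⟩

lemma pvTakeWhile_replicate (t : List Char) (prev : Char) :
    t.takeWhile (fun d => d == prev)
      = List.replicate (t.takeWhile (fun d => d == prev)).length prev := by
  apply List.eq_replicate_length.mpr
  intro b hb
  simpa using List.mem_takeWhile_imp hb

-- Main invariant: starting a fresh run at prev with current streak 1,
-- A's (highest, best) result is B's first-max fold over the runs of prev :: t.
lemma pvMain : ∀ (n : Nat) (t : List Char) (prev : Char) (hi : Int) (best : Char),
    t.length ≤ n → 1 ≤ hi →
    (pvLoopA prev t (1, hi, best)).2 = pvMaxFold (hi, best) (pvRuns (prev :: t)) := by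
  intro n
  induction n with
  | zero =>
    intro t prev hi best hn hhi
    have ht : t = [] := List.eq_nil_of_length_eq_zero (by omega)
    subst ht
    have hruns : pvRuns [prev] = [(prev, 1)] := by simp [pvRuns]
    rw [hruns]
    simp only [pvLoopA, pvMaxFold]
    rw [if_neg (by omega)]
  | succ n ih =>
    intro t prev hi best hn hhi
    have hsplit : t = List.replicate (t.takeWhile (fun d => d == prev)).length prev
        ++ t.dropWhile (fun d => d == prev) := by
      conv_lhs => rw [← List.takeWhile_append_dropWhile (p := fun d => d == prev) (l := t)]
      rw [← pvTakeWhile_replicate]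
    have hc : (((t.takeWhile (fun d => d == prev)).length + 1 : Nat) : Int)
        = 1 + ((t.takeWhile (fun d => d == prev)).length : Int) := by omega
    have habs := pvAbsorb (t.takeWhile (fun d => d == prev)).length prev
      (t.dropWhile (fun d => d == prev)) 1 hi best hhi
    have hruns : pvRuns (prev :: t)
        = (prev, (t.takeWhile (fun d => d == prev)).length + 1)
            :: pvRuns (t.dropWhile (fun d => d == prev)) := by
      simp only [pvRuns]
    rw [hruns]
    have hmf : pvMaxFold (hi, best)
          ((prev, (t.takeWhile (fun d => d == prev)).length + 1)
            :: pvRuns (t.dropWhile (fun d => d == prev)))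
        = pvMaxFold
            (if hi < 1 + ((t.takeWhile (fun d => d == prev)).length : Int)
              then (1 + ((t.takeWhile (fun d => d == prev)).length : Int), prev)
              else (hi, best))
            (pvRuns (t.dropWhile (fun d => d == prev))) := by
      simp only [pvMaxFold, hc]
    rw [hmf]
    conv_lhs => rw [hsplit]
    rw [habs]
    cases hdrop : t.dropWhile (fun d => d == prev) with
    | nil => simp only [pvLoopA, pvRuns, pvMaxFold]
    | cons c t2 =>
      have hne : ¬ (c = prev) := by
        have h5 := List.head?_dropWhile_not (fun d => d == prev) t
        rw [hdrop] at h5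
        simpa using h5
      have hlen : t2.length ≤ n := by
        have h4 := congrArg List.length hsplit
        rw [hdrop] at h4
        simp at h4
        omega
      by_cases hcase : hi < 1 + ((t.takeWhile (fun d => d == prev)).length : Int)
      · rw [if_pos hcase]
        simp only [pvLoopA]
        rw [if_neg hne, if_neg (by omega)]
        exact ih t2 c (1 + ((t.takeWhile (fun d => d == prev)).length : Int)) prev hlen (by omega)
      · rw [if_neg hcase]
        simp only [pvLoopA]
        rw [if_neg hne, if_neg (by omega)]
        exact ih t2 c hi best hlen hhi

-- the fold body of Python's max (first maximal element wins), as a named function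
def pvMBody (acc : Option (Char × Nat)) (x : Char × Nat) : Option (Char × Nat) :=
  match acc with
  | none => some x
  | some m => if m.2 < x.2 then some x else some m

-- Python max's option fold as a plain foldl once the accumulator is some.
lemma pvMaxSome : ∀ (rs : List (Char × Nat)) (r : Char × Nat),
    List.foldl pvMBody (some r) rs
      = some (rs.foldl (fun m x => if m.2 < x.2 then x else m) r) := by
  intro rs
  induction rs with
  | nil => intro r; rfl
  | cons x rs ih =>
    intro r
    simp only [List.foldl_cons, pvMBody]
    by_cases h : r.2 < x.2
    · rw [if_pos h, if_pos h, ih]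
    · rw [if_neg h, if_neg h, ih]

-- PySem's max? on a nonempty list is the pvMBody fold from its head.
lemma pvMaxHead (rs : List (Char × Nat)) (r : Char × Nat) :
    PySem.List.max? (r :: rs) (fun p : Char × Nat => p.2)
      = List.foldl pvMBody (some r) rs := by
  simp only [PySem.List.max?, List.foldl_cons]
  congr 1
  funext acc x
  cases acc <;> rfl

-- Python's max(key=len) over a nonempty run list as a plain first-max foldl.
lemma pvMaxD_cons (rs : List (Char × Nat)) (r : Char × Nat) :
    PySem.List.maxD (r :: rs) (fun p : Char × Nat => p.2) (' ', 0)
      = rs.foldl (fun m x => if m.2 < x.2 then x else m) r := by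
  unfold PySem.List.maxD
  rw [pvMaxHead, pvMaxSome]
  rfl

-- pvMaxFold agrees with the plain foldl used by max, component for component.
lemma pvMaxFold_eq : ∀ (rs : List (Char × Nat)) (c : Char) (k : Nat),
    pvMaxFold (((k : Nat) : Int), c) rs
      = (fun p : Char × Nat => (((p.2 : Nat) : Int), p.1))
          (rs.foldl (fun m x => if m.2 < x.2 then x else m) (c, k)) := by
  intro rs
  induction rs with
  | nil => intro c k; rfl
  | cons x rs ih =>
    intro c k
    simp only [pvMaxFold, List.foldl_cons]
    by_cases h : k < x.2
    · rw [if_pos (by exact_mod_cast h), if_pos h, ih]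
    · rw [if_neg (by exact_mod_cast h), if_neg h, ih]

-- ===== VERDICT (by name: the statement is the Claim_ definition above) =====
theorem f_spec : Claim_equal_f := by
  intro dice _ _
  unfold Spec_f f f_alt
  cases hs : PySem.Int.toChars dice with
  | nil =>
    simp only [pvRuns]
    rfl
  | cons c t =>
    have hb := pvBridge t [c] (1, 1, PySem.List.pyGetD (c :: t) 0 ' ') (by simp)
    simp only [List.singleton_append, List.length_singleton, Nat.cast_one] at hb
    have hgl : ([c].getLastD ' ') = c := rfl
    rw [hgl] at hb
    show (PySem.Int.ofChars? [(List.foldl (pvBodyA (c :: t))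
        (1, 1, PySem.List.pyGetD (c :: t) 0 ' ')
        (PySem.List.pyRange 1 ((c :: t).length : Int))).2.2]).getD 0
      = (PySem.Int.ofChars? [(PySem.List.maxD (pvRuns (c :: t)) (fun r => r.2) (' ', 0)).1]).getD 0
    have hg0 : PySem.List.pyGetD (c :: t) 0 ' ' = c := by
      rw [PySem.List.pyGetD_eq_getElem _ _ (by omega) (by simp)]; rfl
    rw [hg0] at hb
    rw [hg0, hb]
    have hm := pvMain t.length t c 1 c (le_refl _) (le_refl _)
    rw [hm]
    have hruns : pvRuns (c :: t)
        = (c, (t.takeWhile (fun d => d == c)).length + 1)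
            :: pvRuns (t.dropWhile (fun d => d == c)) := by
      simp only [pvRuns]
    rw [hruns]
    have h1 : ∀ (k : Nat) (rs : List (Char × Nat)), 1 ≤ k →
        pvMaxFold (1, c) ((c, k) :: rs) = pvMaxFold (((k : Nat) : Int), c) rs := by
      intro k rs hk
      simp only [pvMaxFold]
      by_cases h2 : (1 : Int) < (k : Int)
      · rw [if_pos h2]
      · rw [if_neg h2, show ((k : Nat) : Int) = 1 by omega]
    rw [h1 _ _ (by omega), pvMaxFold_eq, pvMaxD_cons]
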